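-- pv_equiv track=rewrite | github.com/Ryadhcherifi/opt_int | moindre_cout.py | degre
-- ===== SOURCE A (Python) =====
-- def degre(arete, arr,n):
--     sommet1 = arr[0]
--     sommet2 = arr[1]
--     deg1 = 0
--     deg2 = 0
--     bool = True
--     for i in arete:
--         if i== sommet1:
--             deg1 = deg1 + 1
--         elif i == sommet2:
--             deg2 = deg2 + 1
--         if (deg1 > 1 or deg2 > 1) :
--             bool = False
--             break
--     return bool
-- ===== SOURCE B (Python) =====
-- def degre(arete, arr, n):
--     sommet1 = arr[0]
--     sommet2 = arr[1]
--     return arete.count(sommet1) <= 1 and arete.count(sommet2) <= 1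
-- ===== Notes on version B (the rewrite author's own statement) =====
-- stated objective: simpler
-- what changed: Replaces A's single stateful scan (two counters updated by if/elif with an early break) by two independent full occurrence counts of the endpoints, returning count(arr[0]) <= 1 and count(arr[1]) <= 1.
import Mathlib
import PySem

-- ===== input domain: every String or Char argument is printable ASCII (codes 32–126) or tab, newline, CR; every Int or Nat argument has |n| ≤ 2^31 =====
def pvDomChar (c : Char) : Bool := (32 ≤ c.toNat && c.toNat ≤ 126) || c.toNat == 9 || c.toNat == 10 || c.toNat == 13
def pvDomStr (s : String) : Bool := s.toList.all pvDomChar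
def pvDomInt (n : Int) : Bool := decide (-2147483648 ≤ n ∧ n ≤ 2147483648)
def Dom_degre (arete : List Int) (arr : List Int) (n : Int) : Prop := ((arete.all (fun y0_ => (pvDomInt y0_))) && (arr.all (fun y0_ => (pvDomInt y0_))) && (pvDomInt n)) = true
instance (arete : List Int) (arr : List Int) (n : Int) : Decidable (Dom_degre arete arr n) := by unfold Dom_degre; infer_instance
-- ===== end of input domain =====

-- B replaces A's single stateful loop (two counters, if/elif, early break) by two
-- independent occurrence counts of the endpoints: count(s1) <= 1 and count(s2) <= 1.
-- Objective: simpler/idiomatic; equivalence over arrays with at least two elements.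
-- ===== PORT A =====
def aLoop (s1 s2 : Int) : List Int → Int → Int → Bool
  | [], _, _ => true
  | i :: rest, d1, d2 =>
    let d1' := if i = s1 then d1 + 1 else d1
    let d2' := if i ≠ s1 ∧ i = s2 then d2 + 1 else d2
    if d1' > 1 ∨ d2' > 1 then false else aLoop s1 s2 rest d1' d2'

def degre (arete : List Int) (arr : List Int) (n : Int) : Bool :=
  match PySem.List.pyGet? arr 0, PySem.List.pyGet? arr 1 with
  | some s1, some s2 => aLoop s1 s2 arete 0 0
  | _, _ => false    -- arr[0]/arr[1] raises IndexError; excluded by Pre_degre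

-- ===== PORT B =====
def degre_alt (arete : List Int) (arr : List Int) (n : Int) : Bool :=
  match PySem.List.pyGet? arr 0 with
  | none => false    -- arr[0] raises IndexError; excluded by Pre_degre
  | some s1 =>
    match PySem.List.pyGet? arr 1 with
    | none => false    -- arr[1] raises IndexError; excluded by Pre_degre
    | some s2 => decide (PySem.List.count arete s1 ≤ 1) && decide (PySem.List.count arete s2 ≤ 1)

-- ===== PRECONDITION & SPEC =====
-- Pre_ excludes only arrays with fewer than two elements, where A raises IndexError.
def Pre_degre (arete : List Int) (arr : List Int) (n : Int) : Prop := 2 ≤ arr.length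
instance (arete : List Int) (arr : List Int) (n : Int) : Decidable (Pre_degre arete arr n) := by unfold Pre_degre; infer_instance
def pvWitness_degre : List Int × List Int × Int := ([1, 2, 1], [1, 2], 0)
def Spec_degre (arete : List Int) (arr : List Int) (n : Int) (out : Bool) : Prop := out = degre_alt arete arr n
instance (arete : List Int) (arr : List Int) (n : Int) (out : Bool) : Decidable (Spec_degre arete arr n out) := by unfold Spec_degre; infer_instance

-- ===== CLAIM (what is proved, stated in full; the proofs are below) =====
def Claim_equal_degre : Prop := ∀ (arete : List Int) (arr : List Int) (n : Int), Dom_degre arete arr n → Pre_degre arete arr n → Spec_degre arete arr n (degre arete arr n)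

-- ===== LEMMAS AND PROOFS =====
theorem aLoop_eq (s1 s2 : Int) (l : List Int) : ∀ (d1 d2 : Int),
    0 ≤ d1 → d1 ≤ 1 → 0 ≤ d2 → d2 ≤ 1 →
    aLoop s1 s2 l d1 d2 =
      (decide (d1 + (l.count s1 : Int) ≤ 1) &&
       decide (d2 + ((l.countP (fun i => decide (i ≠ s1 ∧ i = s2))) : Int) ≤ 1)) := by
  induction l with
  | nil => intro d1 d2 h1 h2 h3 h4; simp [aLoop]; omega
  | cons i rest ih =>
    intro d1 d2 h1 h2 h3 h4
    have hc1 : ((i :: rest).count s1 : Int) =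
        (rest.count s1 : Int) + (if i = s1 then 1 else 0) := by
      by_cases hA : i = s1 <;> simp [List.count_cons, hA]
    have hc2 : (((i :: rest).countP (fun i => decide (i ≠ s1 ∧ i = s2))) : Int) =
        ((rest.countP (fun i => decide (i ≠ s1 ∧ i = s2))) : Int) +
          (if i ≠ s1 ∧ i = s2 then 1 else 0) := by
      by_cases hB : i ≠ s1 ∧ i = s2 <;> simp [List.countP_cons, hB]
    rw [hc1, hc2]
    show (if (if i = s1 then d1 + 1 else d1) > 1 ∨ (if i ≠ s1 ∧ i = s2 then d2 + 1 else d2) > 1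
          then false
          else aLoop s1 s2 rest (if i = s1 then d1 + 1 else d1)
                 (if i ≠ s1 ∧ i = s2 then d2 + 1 else d2)) = _
    set c1 : Int := (rest.count s1 : Int) with hcd1
    set c2 : Int := ((rest.countP (fun i => decide (i ≠ s1 ∧ i = s2))) : Int) with hcd2
    have hc1n : 0 ≤ c1 := by rw [hcd1]; positivity
    have hc2n : 0 ≤ c2 := by rw [hcd2]; positivity
    set e1 : Int := if i = s1 then d1 + 1 else d1 with he1
    set e2 : Int := if i ≠ s1 ∧ i = s2 then d2 + 1 else d2 with he2
    have he1b : d1 ≤ e1 ∧ e1 ≤ d1 + 1 ∧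
        d1 + (c1 + (if i = s1 then 1 else 0)) = e1 + c1 := by
      rw [he1]; split_ifs <;> omega
    have he2b : d2 ≤ e2 ∧ e2 ≤ d2 + 1 ∧
        d2 + (c2 + (if i ≠ s1 ∧ i = s2 then 1 else 0)) = e2 + c2 := by
      rw [he2]; split_ifs <;> omega
    by_cases hbr : e1 > 1 ∨ e2 > 1
    · rw [if_pos hbr]; symm
      rw [Bool.and_eq_false_iff]
      rcases hbr with hb | hb
      · left; rw [decide_eq_false_iff_not]; omega
      · right; rw [decide_eq_false_iff_not]; omega
    · rw [if_neg hbr]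
      push_neg at hbr
      rw [ih e1 e2 (by omega) (by omega) (by omega) (by omega)]
      congr 1 <;> (rw [decide_eq_decide]; omega)

theorem countP_eq_count (l : List Int) (s1 s2 : Int) (h : s1 ≠ s2) :
    l.countP (fun i => decide (i ≠ s1 ∧ i = s2)) = l.count s2 := by
  unfold List.count
  apply List.countP_congr
  intro a _
  by_cases ha : a = s2
  · subst ha; simp [Ne.symm h]
  · simp [ha]

theorem countP_eq_zero_same (l : List Int) (s : Int) :
    l.countP (fun i => decide (i ≠ s ∧ i = s)) = 0 := by
  rw [List.countP_eq_zero]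
  intro a _
  simp

-- ===== VERDICT (by name: the statement is the Claim_ definition above) =====
theorem degre_spec : Claim_equal_degre := by
  intro arete arr n _ _
  unfold Spec_degre degre degre_alt
  cases hg0 : PySem.List.pyGet? arr 0 with
  | none => rfl
  | some s1 =>
    cases hg1 : PySem.List.pyGet? arr 1 with
    | none => rfl
    | some s2 =>
      show aLoop s1 s2 arete 0 0 =
        (decide (PySem.List.count arete s1 ≤ 1) && decide (PySem.List.count arete s2 ≤ 1))
      rw [aLoop_eq s1 s2 arete 0 0 le_rfl zero_le_one le_rfl zero_le_one,
        PySem.List.count_eq, PySem.List.count_eq]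
      by_cases h : s1 = s2
      · subst h
        rw [countP_eq_zero_same]
        by_cases hc : arete.count s1 ≤ 1
        · have h1 : (0:Int) + (arete.count s1 : Int) ≤ 1 := by push_cast; omega
          simp [hc, h1]
        · have h1 : ¬((0:Int) + (arete.count s1 : Int) ≤ 1) := by push_cast; omega
          simp [hc, h1]
      · rw [countP_eq_count arete s1 s2 h]
        congr 1 <;> (rw [decide_eq_decide]; omega)
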